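-- pv_equiv track=rewrite | github.com/chethanbr86/Python_programs | hackerearth/he_vowel.py | solve
-- ===== SOURCE A (Python) =====
-- def solve(s):
--     vowels = set(['a', 'e', 'i', 'o', 'u'])
--     flag1 = True
--     flag2 = True
--     for i in vowels:
--         if i not in s:
--             flag1 = False
--         if i.upper() not in s:
--             flag2 = False
--     return flag1 or flag2
-- ===== SOURCE B (Python) =====
-- def solve(s):
--     need_lo = set("aeiou")
--     need_up = set("AEIOU")
--     for c in s:
--         need_lo.discard(c)
--         need_up.discard(c)
--     return not need_lo or not need_up
-- ===== Notes on version B (the rewrite author's own statement) =====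
-- stated objective: alternative
-- what changed: Instead of scanning s once per vowel with two flags, B makes a single pass over the characters of s, discarding each from two remaining-needed vowel sets, and succeeds if either set is emptied.
import Mathlib
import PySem

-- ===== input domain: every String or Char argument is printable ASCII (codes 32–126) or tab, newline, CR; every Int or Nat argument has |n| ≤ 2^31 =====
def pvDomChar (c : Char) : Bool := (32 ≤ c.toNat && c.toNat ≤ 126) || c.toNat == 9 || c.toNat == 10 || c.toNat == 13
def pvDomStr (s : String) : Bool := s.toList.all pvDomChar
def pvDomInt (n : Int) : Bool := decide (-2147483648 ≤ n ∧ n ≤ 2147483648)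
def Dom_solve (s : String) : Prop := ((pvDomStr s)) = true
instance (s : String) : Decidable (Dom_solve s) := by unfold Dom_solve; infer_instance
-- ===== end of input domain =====

-- B makes one pass over s, discarding each character from two remaining-needed vowel sets, instead of A's per-vowel scans with two flags (alternative decomposition).


-- ===== PORT A =====
-- 'i not in s' with a one-char i is character membership; i.upper() = Char.toUpper (exact on ASCII)
def solve (s : String) : Bool :=
  let vowels : PySem.Set Char := PySem.Set.ofList ['a','e','i','o','u']
  let fl := vowels.foldl (fun (fl : Bool × Bool) i =>
      (if ¬ (i ∈ s.toList) then false else fl.1,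
       if ¬ (i.toUpper ∈ s.toList) then false else fl.2)) (true, true)
  fl.1 || fl.2

-- ===== PORT B =====
-- one pass over the characters of s, discarding each from the two needed-vowel sets;
-- 'not need' (truthiness of a set) is emptiness of the set
def solve_alt (s : String) : Bool :=
  let need := s.toList.foldl
      (fun (p : PySem.Set Char × PySem.Set Char) c =>
        (PySem.Set.discard p.1 c, PySem.Set.discard p.2 c))
      (PySem.Set.ofList "aeiou".toList, PySem.Set.ofList "AEIOU".toList)
  need.1.isEmpty || need.2.isEmpty

-- ===== PRECONDITION & SPEC =====
def Spec_solve (s : String) (out : Bool) : Prop := out = solve_alt s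
instance (s : String) (out : Bool) : Decidable (Spec_solve s out) := by unfold Spec_solve; infer_instance

-- ===== CLAIM (what is proved, stated in full; the proofs are below) =====
def Claim_equal_solve : Prop := ∀ (s : String), Dom_solve s → Spec_solve s (solve s)

-- ===== LEMMAS AND PROOFS =====

-- the paired fold splits into two independent folds
theorem foldl_discard_pair (l : List Char) (v w : PySem.Set Char) :
    l.foldl (fun (p : PySem.Set Char × PySem.Set Char) c =>
        (PySem.Set.discard p.1 c, PySem.Set.discard p.2 c)) (v, w)
      = (l.foldl PySem.Set.discard v, l.foldl PySem.Set.discard w) := by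
  induction l generalizing v w with
  | nil => rfl
  | cons c l ih => simp [List.foldl, ih]

theorem mem_foldl_discard (l : List Char) (v : PySem.Set Char) (x : Char) :
    x ∈ l.foldl PySem.Set.discard v ↔ x ∈ v ∧ x ∉ l := by
  induction l generalizing v with
  | nil => simp
  | cons c l ih =>
      simp [List.foldl, ih, PySem.Set.mem_discard]
      tauto

theorem foldl_discard_empty (l : List Char) (v : PySem.Set Char) :
    l.foldl PySem.Set.discard v = [] ↔ ∀ x ∈ v, x ∈ l := by
  rw [List.eq_nil_iff_forall_not_mem]
  constructor
  · intro h x hx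
    by_contra hnl
    exact h x ((mem_foldl_discard l v x).mpr ⟨hx, hnl⟩)
  · intro h x hx
    rcases (mem_foldl_discard l v x).mp hx with ⟨hv, hnl⟩
    exact hnl (h x hv)

-- ===== VERDICT (by name: the statement is the Claim_ definition above) =====
set_option maxHeartbeats 2000000 in
theorem solve_spec : Claim_equal_solve := by
  intro s _
  unfold Spec_solve solve solve_alt
  rw [show PySem.Set.ofList ['a','e','i','o','u'] = ['a','e','i','o','u'] from by decide]
  simp only [List.foldl]
  rw [show ('a').toUpper = 'A' from by decide, show ('e').toUpper = 'E' from by decide,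
      show ('i').toUpper = 'I' from by decide, show ('o').toUpper = 'O' from by decide,
      show ('u').toUpper = 'U' from by decide]
  rw [foldl_discard_pair]
  rw [show (PySem.Set.ofList "aeiou".toList : PySem.Set Char) = ['a','e','i','o','u'] from by decide,
      show (PySem.Set.ofList "AEIOU".toList : PySem.Set Char) = ['A','E','I','O','U'] from by decide]
  have hlo := foldl_discard_empty s.toList ['a','e','i','o','u']
  have hup := foldl_discard_empty s.toList ['A','E','I','O','U']
  simp only [List.mem_cons, List.not_mem_nil, or_false, forall_eq_or_imp, forall_eq] at hlo hup
  by_cases h1 : 'a' ∈ s.toList <;> by_cases h2 : 'e' ∈ s.toList <;>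
  by_cases h3 : 'i' ∈ s.toList <;> by_cases h4 : 'o' ∈ s.toList <;>
  by_cases h5 : 'u' ∈ s.toList <;>
  by_cases g1 : 'A' ∈ s.toList <;> by_cases g2 : 'E' ∈ s.toList <;>
  by_cases g3 : 'I' ∈ s.toList <;> by_cases g4 : 'O' ∈ s.toList <;>
  by_cases g5 : 'U' ∈ s.toList <;>
  simp [List.isEmpty_iff, h1, h2, h3, h4, h5, g1, g2, g3, g4, g5, hlo, hup]
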